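-- pv_equiv track=rewrite | github.com/Grumpified-OGGVCT/model-trust-scorecard | scripts/generate_dashboard.py | _capabilities_from_tags
-- ===== SOURCE A (Python) =====
-- def _capabilities_from_tags(tags: list[str], context_window: int | None = None) -> str:
--     normalized = {tag.lower() for tag in tags}
--     caps: list[str] = []
--     capability_map = [
--         ("Vision", {"vision", "image", "multimodal"}),
--         ("Audio", {"audio", "speech"}),
--         ("Video", {"video"}),
--         ("OCR", {"ocr"}),
--         ("Docs", {"document-analysis", "office-automation"}),
--         ("Code", {"coding", "software-engineering"}),
--         ("Tools", {"tool-use", "function-calling"}),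
--         ("Agent", {"agentic"}),
--         ("Reasoning", {"reasoning"}),
--         ("Multi-Lang", {"multilingual"}),
--         ("RAG", {"rag"}),
--         ("Enterprise", {"enterprise"}),
--         ("Open Weights", {"open-weight"}),
--         ("Dense", {"dense"}),
--     ]
--     for label, tag_set in capability_map:
--         if normalized.intersection(tag_set):
--             caps.append(label)
--     if "long-context" in normalized or (context_window and context_window >= 128000):
--         caps.append("Long Context")
--     return " • ".join(caps) if caps else "-"
-- ===== SOURCE B (Python) =====
-- _CAPABILITY_MAP = [
--     ("Vision", ("vision", "image", "multimodal")),
--     ("Audio", ("audio", "speech")),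
--     ("Video", ("video",)),
--     ("OCR", ("ocr",)),
--     ("Docs", ("document-analysis", "office-automation")),
--     ("Code", ("coding", "software-engineering")),
--     ("Tools", ("tool-use", "function-calling")),
--     ("Agent", ("agentic",)),
--     ("Reasoning", ("reasoning",)),
--     ("Multi-Lang", ("multilingual",)),
--     ("RAG", ("rag",)),
--     ("Enterprise", ("enterprise",)),
--     ("Open Weights", ("open-weight",)),
--     ("Dense", ("dense",)),
-- ]
--
-- _LABELS = [label for label, _ in _CAPABILITY_MAP]
--
-- # Inverted index built once: lowercase tag -> capability label.
-- _TAG_TO_LABEL = {}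
-- for _label, _tags in _CAPABILITY_MAP:
--     for _t in _tags:
--         _TAG_TO_LABEL[_t] = _label
-- _TAG_TO_LABEL["long-context"] = "Long Context"
--
--
-- def _capabilities_from_tags(tags: list[str], context_window: int | None = None) -> str:
--     matched = set()
--     for tag in tags:
--         label = _TAG_TO_LABEL.get(tag.lower())
--         if label is not None:
--             matched.add(label)
--     caps = [label for label in _LABELS if label in matched]
--     if "Long Context" in matched or (context_window and context_window >= 128000):
--         caps.append("Long Context")
--     return " • ".join(caps) if caps else "-"
-- ===== Notes on version B (the rewrite author's own statement) =====
-- stated objective: alternative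
-- what changed: Replaces A's normalized-set plus 14 per-label set intersections with an inverted index (lowercase tag -> label, including long-context) consulted once per input tag; the output is the canonical label list filtered by the matched-label set.
import Mathlib
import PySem

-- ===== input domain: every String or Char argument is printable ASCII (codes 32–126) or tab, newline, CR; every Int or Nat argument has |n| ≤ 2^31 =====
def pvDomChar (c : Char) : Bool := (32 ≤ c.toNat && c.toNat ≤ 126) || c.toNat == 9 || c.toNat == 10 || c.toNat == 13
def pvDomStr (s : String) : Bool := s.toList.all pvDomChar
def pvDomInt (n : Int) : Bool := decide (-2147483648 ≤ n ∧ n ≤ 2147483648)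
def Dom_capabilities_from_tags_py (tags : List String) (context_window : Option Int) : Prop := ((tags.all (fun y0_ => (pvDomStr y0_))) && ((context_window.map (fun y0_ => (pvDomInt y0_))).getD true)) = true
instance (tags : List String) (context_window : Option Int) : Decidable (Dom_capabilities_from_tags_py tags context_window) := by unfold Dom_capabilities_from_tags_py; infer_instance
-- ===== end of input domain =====

-- B replaces A's per-label set intersections with an inverted index (tag → label) built once and
-- consulted once per input tag; the output is the canonical label list filtered by the matched set.
-- Objective: alternative (same observable behaviour, different data structure and traversal).

-- ===== PORT A =====
def capabilities_from_tags_py (tags : List String) (context_window : Option Int) : String :=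
  let normalized : PySem.Set String := PySem.Set.ofList (tags.map PySem.Str.lower)
  let capability_map : List (String × PySem.Set String) :=
    [("Vision", PySem.Set.ofList ["vision", "image", "multimodal"]),
     ("Audio", PySem.Set.ofList ["audio", "speech"]),
     ("Video", PySem.Set.ofList ["video"]),
     ("OCR", PySem.Set.ofList ["ocr"]),
     ("Docs", PySem.Set.ofList ["document-analysis", "office-automation"]),
     ("Code", PySem.Set.ofList ["coding", "software-engineering"]),
     ("Tools", PySem.Set.ofList ["tool-use", "function-calling"]),
     ("Agent", PySem.Set.ofList ["agentic"]),
     ("Reasoning", PySem.Set.ofList ["reasoning"]),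
     ("Multi-Lang", PySem.Set.ofList ["multilingual"]),
     ("RAG", PySem.Set.ofList ["rag"]),
     ("Enterprise", PySem.Set.ofList ["enterprise"]),
     ("Open Weights", PySem.Set.ofList ["open-weight"]),
     ("Dense", PySem.Set.ofList ["dense"])]
  let caps : List String :=
    capability_map.foldl
      (fun caps e => if !(PySem.Set.inter normalized e.2).isEmpty then caps ++ [e.1] else caps) []
  -- 'context_window and context_window >= 128000': truthiness of the int, then the comparison
  let caps :=
    if PySem.Set.contains normalized "long-context" ||
       (match context_window with
        | some c => decide (c ≠ 0) && decide (128000 ≤ c)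
        | none => false) then caps ++ ["Long Context"] else caps
  if !caps.isEmpty then PySem.Str.join " • " caps else "-"

-- ===== PORT B =====
def capLabelPairs : List (String × List String) :=
  [("Vision", ["vision", "image", "multimodal"]),
   ("Audio", ["audio", "speech"]),
   ("Video", ["video"]),
   ("OCR", ["ocr"]),
   ("Docs", ["document-analysis", "office-automation"]),
   ("Code", ["coding", "software-engineering"]),
   ("Tools", ["tool-use", "function-calling"]),
   ("Agent", ["agentic"]),
   ("Reasoning", ["reasoning"]),
   ("Multi-Lang", ["multilingual"]),
   ("RAG", ["rag"]),
   ("Enterprise", ["enterprise"]),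
   ("Open Weights", ["open-weight"]),
   ("Dense", ["dense"])]

def capLabels : List String := capLabelPairs.map Prod.fst

-- the inverted index, built once: lowercase tag → capability label
def capIndex : PySem.Dict String String :=
  (capLabelPairs.foldl (fun d e => e.2.foldl (fun d t => d.insert t e.1) d)
    PySem.Dict.empty).insert "long-context" "Long Context"

def altMatched (tags : List String) : PySem.Set String :=
  tags.foldl
    (fun m tag =>
      match capIndex.get? (PySem.Str.lower tag) with
      | some label => m.add label
      | none => m) PySem.Set.empty

def capabilities_from_tags_py_alt (tags : List String) (context_window : Option Int) : String :=
  let matched := altMatched tags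
  let caps : List String := capLabels.filter (fun l => PySem.Set.contains matched l)
  let caps :=
    if PySem.Set.contains matched "Long Context" ||
       (match context_window with
        | some c => decide (c ≠ 0) && decide (128000 ≤ c)
        | none => false) then caps ++ ["Long Context"] else caps
  if !caps.isEmpty then PySem.Str.join " • " caps else "-"

-- ===== PRECONDITION & SPEC =====
def Spec_capabilities_from_tags_py (tags : List String) (context_window : Option Int) (out : String) : Prop := out = capabilities_from_tags_py_alt tags context_window
instance (tags : List String) (context_window : Option Int) (out : String) : Decidable (Spec_capabilities_from_tags_py tags context_window out) := by unfold Spec_capabilities_from_tags_py; infer_instance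

-- ===== CLAIM (what is proved, stated in full; the proofs are below) =====
def Claim_equal_capabilities_from_tags_py : Prop := ∀ (tags : List String) (context_window : Option Int), Dom_capabilities_from_tags_py tags context_window → Spec_capabilities_from_tags_py tags context_window (capabilities_from_tags_py tags context_window)

-- ===== LEMMAS AND PROOFS =====

-- the inverted index, spelled out as its association list
set_option maxHeartbeats 1000000 in
lemma capIndex_eq : capIndex = PySem.Dict.mk
    [("vision", "Vision"), ("image", "Vision"), ("multimodal", "Vision"),
     ("audio", "Audio"), ("speech", "Audio"), ("video", "Video"), ("ocr", "OCR"),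
     ("document-analysis", "Docs"), ("office-automation", "Docs"),
     ("coding", "Code"), ("software-engineering", "Code"),
     ("tool-use", "Tools"), ("function-calling", "Tools"), ("agentic", "Agent"),
     ("reasoning", "Reasoning"), ("multilingual", "Multi-Lang"), ("rag", "RAG"),
     ("enterprise", "Enterprise"), ("open-weight", "Open Weights"), ("dense", "Dense"),
     ("long-context", "Long Context")] := by rfl

-- first-match lookup in a duplicate-free association list is list membership
lemma get?_mk_some_iff {κ ν : Type} [BEq κ] [LawfulBEq κ] (ps : List (κ × ν))
    (h : (ps.map Prod.fst).Nodup) (x : κ) (v : ν) :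
    (PySem.Dict.mk ps).get? x = some v ↔ (x, v) ∈ ps := by
  induction ps with
  | nil => simp [PySem.Dict.get?]
  | cons p rest ih =>
    obtain ⟨k, w⟩ := p
    simp only [List.map_cons, List.nodup_cons, List.mem_map] at h
    rw [PySem.Dict.get?_mk_cons]
    by_cases hk : k = x
    · subst hk
      simp only [beq_self_eq_true, if_true, List.mem_cons, Prod.mk.injEq, true_and,
        Option.some_inj]
      constructor
      · rintro rfl; left; rfl
      · rintro (rfl | hmem)
        · rfl
        · exact absurd ⟨(k, v), hmem, rfl⟩ h.1
    · simp only [beq_iff_eq, hk, if_false, ih h.2, List.mem_cons, Prod.mk.injEq]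
      constructor
      · exact Or.inr
      · rintro (⟨rfl, _⟩ | hm)
        · exact absurd rfl hk
        · exact hm

set_option maxHeartbeats 1000000 in
lemma capIndex_get (s l : String) : capIndex.get? s = some l ↔
    (s, l) ∈ [("vision", "Vision"), ("image", "Vision"), ("multimodal", "Vision"),
     ("audio", "Audio"), ("speech", "Audio"), ("video", "Video"), ("ocr", "OCR"),
     ("document-analysis", "Docs"), ("office-automation", "Docs"),
     ("coding", "Code"), ("software-engineering", "Code"),
     ("tool-use", "Tools"), ("function-calling", "Tools"), ("agentic", "Agent"),
     ("reasoning", "Reasoning"), ("multilingual", "Multi-Lang"), ("rag", "RAG"),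
     ("enterprise", "Enterprise"), ("open-weight", "Open Weights"), ("dense", "Dense"),
     ("long-context", "Long Context")] := by
  rw [capIndex_eq, get?_mk_some_iff _ (by decide)]

lemma mem_altMatched (tags : List String) (l : String) :
    l ∈ altMatched tags ↔ ∃ t ∈ tags, capIndex.get? (PySem.Str.lower t) = some l := by
  unfold altMatched
  suffices h : ∀ (acc : PySem.Set String),
      l ∈ tags.foldl (fun m tag =>
        match capIndex.get? (PySem.Str.lower tag) with
        | some label => m.add label
        | none => m) acc ↔ l ∈ acc ∨ ∃ t ∈ tags, capIndex.get? (PySem.Str.lower t) = some l by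
    simpa using h PySem.Set.empty
  induction tags with
  | nil => simp
  | cons t ts ih =>
    intro acc
    simp only [List.foldl_cons]
    rcases hg : capIndex.get? (PySem.Str.lower t) with _ | lab
    · simp [ih, hg]
    · simp only [ih, PySem.Set.mem_add, List.mem_cons]
      constructor
      · rintro (h | h)
        · rcases h with h | rfl
          · exact Or.inl h
          · exact Or.inr ⟨t, Or.inl rfl, hg⟩
        · rcases h with ⟨u, hu, hgu⟩
          exact Or.inr ⟨u, Or.inr hu, hgu⟩
      · rintro (h | ⟨u, (rfl | hu), hgu⟩)
        · exact Or.inl (Or.inl h)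
        · rw [hg] at hgu
          exact Or.inl (Or.inr (Option.some_inj.mp hgu).symm)
        · exact Or.inr ⟨u, hu, hgu⟩

lemma inter_ne_nil (L ws : List String) :
    (!(PySem.Set.inter (PySem.Set.ofList L) (PySem.Set.ofList ws)).isEmpty) = true ↔
      ∃ w, w ∈ ws ∧ w ∈ L := by
  rw [Bool.not_eq_eq_eq_not, Bool.not_true, List.isEmpty_eq_false_iff_exists_mem]
  constructor
  · rintro ⟨w, hw⟩
    rw [PySem.Set.mem_inter] at hw
    exact ⟨w, by simpa [PySem.Set.mem_ofList] using hw.2,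
      by simpa [PySem.Set.mem_ofList] using hw.1⟩
  · rintro ⟨w, hws, hL⟩
    exact ⟨w, by rw [PySem.Set.mem_inter]; simp [PySem.Set.mem_ofList, hws, hL]⟩

-- both conditions say: some tag of ws occurs among the lowered input tags
lemma cond_eq (tags : List String) (label : String) (ws : List String)
    (hws : ∀ s, capIndex.get? s = some label ↔ s ∈ ws) :
    (!(PySem.Set.inter (PySem.Set.ofList (tags.map PySem.Str.lower)) (PySem.Set.ofList ws)).isEmpty)
      = PySem.Set.contains (altMatched tags) label := by
  rw [Bool.eq_iff_iff, inter_ne_nil, PySem.Set.contains_iff, mem_altMatched]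
  constructor
  · rintro ⟨w, hws', hL⟩
    rcases List.mem_map.mp hL with ⟨t, ht, rfl⟩
    exact ⟨t, ht, (hws _).mpr hws'⟩
  · rintro ⟨t, ht, hg⟩
    exact ⟨PySem.Str.lower t, (hws _).mp hg, List.mem_map.mpr ⟨t, ht, rfl⟩⟩

lemma longContext_cond_eq (tags : List String) :
    PySem.Set.contains (PySem.Set.ofList (tags.map PySem.Str.lower)) "long-context"
      = PySem.Set.contains (altMatched tags) "Long Context" := by
  rw [Bool.eq_iff_iff, PySem.Set.contains_iff, PySem.Set.contains_iff, mem_altMatched,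
    PySem.Set.mem_ofList]
  have hws : ∀ s, capIndex.get? s = some "Long Context" ↔ s ∈ ["long-context"] := by
    intro s; rw [capIndex_get]; simp
  constructor
  · intro hL
    rcases List.mem_map.mp hL with ⟨t, ht, hlow⟩
    exact ⟨t, ht, (hws _).mpr (by simp [hlow])⟩
  · rintro ⟨t, ht, hg⟩
    have : PySem.Str.lower t = "long-context" := by simpa using (hws _).mp hg
    exact List.mem_map.mpr ⟨t, ht, this⟩

lemma caps_eq (tags : List String) :
    (([("Vision", PySem.Set.ofList ["vision", "image", "multimodal"]),
       ("Audio", PySem.Set.ofList ["audio", "speech"]),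
       ("Video", PySem.Set.ofList ["video"]),
       ("OCR", PySem.Set.ofList ["ocr"]),
       ("Docs", PySem.Set.ofList ["document-analysis", "office-automation"]),
       ("Code", PySem.Set.ofList ["coding", "software-engineering"]),
       ("Tools", PySem.Set.ofList ["tool-use", "function-calling"]),
       ("Agent", PySem.Set.ofList ["agentic"]),
       ("Reasoning", PySem.Set.ofList ["reasoning"]),
       ("Multi-Lang", PySem.Set.ofList ["multilingual"]),
       ("RAG", PySem.Set.ofList ["rag"]),
       ("Enterprise", PySem.Set.ofList ["enterprise"]),
       ("Open Weights", PySem.Set.ofList ["open-weight"]),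
       ("Dense", PySem.Set.ofList ["dense"])] : List (String × PySem.Set String)).foldl
      (fun caps e =>
        if !(PySem.Set.inter (PySem.Set.ofList (tags.map PySem.Str.lower)) e.2).isEmpty
        then caps ++ [e.1] else caps) [])
    = capLabels.filter (fun l => PySem.Set.contains (altMatched tags) l) := by
  rw [PySem.List.foldl_append_if
    (fun (e : String × PySem.Set String) =>
      !(PySem.Set.inter (PySem.Set.ofList (tags.map PySem.Str.lower)) e.2).isEmpty)
    Prod.fst, List.nil_append]
  show _ = List.filter _ (capLabelPairs.map Prod.fst)
  rw [List.filter_map]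
  congr 1
  apply List.filter_congr
  intro e he
  fin_cases he <;>
    exact cond_eq tags _ _ (fun s => by rw [capIndex_get]; simp)

-- ===== VERDICT (by name: the statement is the Claim_ definition above) =====
theorem capabilities_from_tags_py_spec : Claim_equal_capabilities_from_tags_py := by
  intro tags cw _
  unfold Spec_capabilities_from_tags_py capabilities_from_tags_py capabilities_from_tags_py_alt
  dsimp only []
  rw [caps_eq tags, longContext_cond_eq tags]
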